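-- pv_equiv track=rewrite | github.com/MarisaRichmond94/RagBookGui | backend/app/timeline.py | _resolve_character_names
-- ===== SOURCE A (Python) =====
-- def _normalize_option_values(values: list[str], limit: int) -> list[str]:
--     seen: set[str] = set()
--     out: list[str] = []
--     for raw in values:
--         value = " ".join(str(raw).split()).strip(" .,:;!?")
--         if not value:
--             continue
--         key = value.lower()
--         if key in seen:
--             continue
--         seen.add(key)
--         out.append(value)
--         if len(out) >= limit:
--             break
--     return sorted(out, key=lambda item: item.lower())
--
-- def _resolve_character_names(values: list[str], limit: int) -> list[str]:
--     normalized = _normalize_option_values(values, limit=5000)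
--     full_names_by_first: dict[str, set[str]] = {}
--     for value in normalized:
--         parts = value.split()
--         if len(parts) >= 2:
--             full_names_by_first.setdefault(parts[0].lower(), set()).add(" ".join(parts[:2]))
--
--     resolved: list[str] = []
--     for value in normalized:
--         parts = value.split()
--         if len(parts) == 1:
--             candidates = full_names_by_first.get(parts[0].lower(), set())
--             if len(candidates) == 1:
--                 resolved.append(next(iter(candidates)))
--                 continue
--         resolved.append(value)
--     return _normalize_option_values(resolved, limit)
-- ===== SOURCE B (Python) =====
-- def _normalize_option_values(values, limit):
--     seen = set()
--     out = []
--     for raw in values: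
--         value = " ".join(str(raw).split()).strip(" .,:;!?")
--         if not value:
--             continue
--         key = value.lower()
--         if key in seen:
--             continue
--         seen.add(key)
--         out.append(value)
--         if len(out) >= limit:
--             break
--     return sorted(out, key=lambda item: item.lower())
--
-- def _resolve_character_names(values, limit):
--     normalized = _normalize_option_values(values, limit=5000)
--
--     def resolve(value):
--         parts = value.split()
--         if len(parts) == 1:
--             word = parts[0].lower()
--             candidates = set()
--             for other in normalized:
--                 op = other.split()
--                 if len(op) >= 2 and op[0].lower() == word:
--                     candidates.add(" ".join(op[:2]))
--             if len(candidates) == 1: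
--                 return candidates.pop()
--         return value
--
--     return _normalize_option_values([resolve(v) for v in normalized], limit)
-- ===== Notes on version B (the rewrite author's own statement) =====
-- stated objective: alternative
-- what changed: B drops A's prebuilt first-word-to-full-names dict entirely: each single-word entry is resolved by directly scanning the normalized list and collecting the distinct first-two-word names with a matching first word, and the result list is built by mapping a pure resolver over the normalized list instead of A's append loop over a shared mutable dict.
import Mathlib
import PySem

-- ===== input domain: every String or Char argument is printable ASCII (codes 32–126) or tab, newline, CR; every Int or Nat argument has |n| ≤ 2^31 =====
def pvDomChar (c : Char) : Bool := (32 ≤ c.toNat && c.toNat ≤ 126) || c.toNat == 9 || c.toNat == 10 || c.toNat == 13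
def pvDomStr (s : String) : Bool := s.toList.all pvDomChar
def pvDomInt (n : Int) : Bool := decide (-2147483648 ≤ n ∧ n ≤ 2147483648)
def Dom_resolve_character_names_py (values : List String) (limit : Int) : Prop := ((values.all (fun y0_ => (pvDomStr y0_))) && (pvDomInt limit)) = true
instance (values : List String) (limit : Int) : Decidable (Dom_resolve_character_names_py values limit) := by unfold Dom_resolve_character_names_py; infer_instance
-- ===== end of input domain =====

-- B removes A's prebuilt first-word dict: each single-word entry is resolved by a direct scan of
-- the normalized list (alternative decomposition, not faster). Both Pythons share the identical
-- helper _normalize_option_values, ported once below.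

-- ===== PORT A =====
-- shared helper: _normalize_option_values (identical code in Source A and Source B)
def pvNormGo (limit : Int) : List String → PySem.Set String → List String → List String
  | [], _, out => out
  | raw :: rest, seen, out =>
    let value := PySem.Str.stripChars (PySem.Str.join " " (PySem.Str.split₀ raw)) " .,:;!?"
    if value = "" then pvNormGo limit rest seen out
    else
      let key := PySem.Str.lower value
      if PySem.Set.contains seen key then pvNormGo limit rest seen out
      else
        -- append, then 'if len(out) >= limit: break'
        if limit ≤ ((out.length + 1 : Nat) : Int) then out ++ [value]
        else pvNormGo limit rest (PySem.Set.add seen key) (out ++ [value])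

def pvNormalize (values : List String) (limit : Int) : List String :=
  PySem.List.sorted (pvNormGo limit values PySem.Set.empty []) PySem.Str.lower false

-- A: build full_names_by_first by setdefault/add over the normalized list
-- (parts[:2] on a list of words is List.take 2, exact for this nonnegative bound;
--  parts[0] with len(parts) ≥ 1 established is headD "")
def pvFirst2Dict (normalized : List String) : PySem.Dict String (PySem.Set String) :=
  normalized.foldl (fun d value =>
    let parts := PySem.Str.split₀ value
    if 2 ≤ parts.length then
      let key := PySem.Str.lower (parts.headD "")
      d.insert key (PySem.Set.add (d.getD key PySem.Set.empty)
        (PySem.Str.join " " (parts.take 2)))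
    else d) PySem.Dict.empty

def resolve_character_names_py (values : List String) (limit : Int) : List String :=
  let normalized := pvNormalize values 5000
  let d := pvFirst2Dict normalized
  let resolved := normalized.foldl (fun resolved value =>
    let parts := PySem.Str.split₀ value
    if parts.length = 1 then
      let candidates := d.getD (PySem.Str.lower (parts.headD "")) PySem.Set.empty
      if candidates.length = 1 then
        -- next(iter(candidates)) on a size-1 set is its unique element
        resolved ++ [candidates.headD ""]
      else resolved ++ [value]
    else resolved ++ [value]) []
  pvNormalize resolved limit

-- ===== PORT B =====
def pvResolveOne (normalized : List String) (value : String) : String :=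
  let parts := PySem.Str.split₀ value
  if parts.length = 1 then
    let word := PySem.Str.lower (parts.headD "")
    let candidates := normalized.foldl (fun s other =>
      let op := PySem.Str.split₀ other
      if 2 ≤ op.length ∧ PySem.Str.lower (op.headD "") = word then
        PySem.Set.add s (PySem.Str.join " " (op.take 2))
      else s) PySem.Set.empty
    -- candidates.pop() on a size-1 set is its unique element
    if candidates.length = 1 then candidates.headD "" else value
  else value

def resolve_character_names_py_alt (values : List String) (limit : Int) : List String :=
  let normalized := pvNormalize values 5000
  pvNormalize (normalized.map (pvResolveOne normalized)) limit

-- ===== PRECONDITION & SPEC =====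
def Spec_resolve_character_names_py (values : List String) (limit : Int) (out : List String) : Prop := out = resolve_character_names_py_alt values limit
instance (values : List String) (limit : Int) (out : List String) : Decidable (Spec_resolve_character_names_py values limit out) := by unfold Spec_resolve_character_names_py; infer_instance

-- ===== CLAIM (what is proved, stated in full; the proofs are below) =====
def Claim_equal_resolve_character_names_py : Prop := ∀ (values : List String) (limit : Int), Dom_resolve_character_names_py values limit → Spec_resolve_character_names_py values limit (resolve_character_names_py values limit)

-- ===== LEMMAS AND PROOFS =====

-- the per-element value A's resolution loop appends (proof-side helper)
def pvGA (values : List String) (value : String) : String :=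
  let parts := PySem.Str.split₀ value
  if parts.length = 1 then
    let candidates := (pvFirst2Dict (pvNormalize values 5000)).getD
      (PySem.Str.lower (parts.headD "")) PySem.Set.empty
    if candidates.length = 1 then candidates.headD "" else value
  else value

-- A's dict lookup at w equals B's direct scan of the same list.
theorem pvDict_scan (l : List String) (d : PySem.Dict String (PySem.Set String)) (w : String) :
    (l.foldl (fun d value =>
      let parts := PySem.Str.split₀ value
      if 2 ≤ parts.length then
        let key := PySem.Str.lower (parts.headD "")
        d.insert key (PySem.Set.add (d.getD key PySem.Set.empty)
          (PySem.Str.join " " (parts.take 2)))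
      else d) d).getD w PySem.Set.empty
    = l.foldl (fun s other =>
      let op := PySem.Str.split₀ other
      if 2 ≤ op.length ∧ PySem.Str.lower (op.headD "") = w then
        PySem.Set.add s (PySem.Str.join " " (op.take 2))
      else s) (d.getD w PySem.Set.empty) := by
  induction l generalizing d with
  | nil => rfl
  | cons v rest ih =>
    simp only [List.foldl_cons]
    rw [ih]
    congr 1
    by_cases h2 : 2 ≤ (PySem.Str.split₀ v).length
    · rw [if_pos h2, PySem.Dict.getD_insert]
      by_cases hw : PySem.Str.lower ((PySem.Str.split₀ v).headD "") = w
      · subst hw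
        simp [h2]
      · rw [if_neg (Ne.symm hw), if_neg (fun hc => hw hc.2)]
    · rw [if_neg h2, if_neg (fun hc => h2 hc.1)]

-- A's resolution loop is acc ++ the map of its per-element value (specific to A's branch structure)
theorem pvA_loop (values : List String) (l acc : List String) :
    (l.foldl (fun resolved value =>
      let parts := PySem.Str.split₀ value
      if parts.length = 1 then
        let candidates := (pvFirst2Dict (pvNormalize values 5000)).getD
          (PySem.Str.lower (parts.headD "")) PySem.Set.empty
        if candidates.length = 1 then resolved ++ [candidates.headD ""]
        else resolved ++ [value]
      else resolved ++ [value]) acc)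
    = acc ++ l.map (pvGA values) := by
  induction l generalizing acc with
  | nil => simp
  | cons v rest ih =>
    simp only [List.foldl_cons, List.map_cons]
    have hstep : ∀ acc' : List String,
        (let parts := PySem.Str.split₀ v
         if parts.length = 1 then
           let candidates := (pvFirst2Dict (pvNormalize values 5000)).getD
             (PySem.Str.lower (parts.headD "")) PySem.Set.empty
           if candidates.length = 1 then acc' ++ [candidates.headD ""]
           else acc' ++ [v]
         else acc' ++ [v]) = acc' ++ [pvGA values v] := by
      intro acc'
      unfold pvGA
      dsimp only
      split_ifs <;> rfl
    rw [hstep, ih]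
    simp

-- ===== VERDICT (by name: the statement is the Claim_ definition above) =====
theorem resolve_character_names_py_spec : Claim_equal_resolve_character_names_py := by
  intro values limit _
  unfold Spec_resolve_character_names_py resolve_character_names_py resolve_character_names_py_alt
  simp only []
  congr 1
  rw [pvA_loop]
  simp only [List.nil_append]
  apply List.map_congr_left
  intro v _
  unfold pvGA pvResolveOne
  dsimp only
  by_cases h1 : (PySem.Str.split₀ v).length = 1
  · rw [if_pos h1, if_pos h1, pvFirst2Dict, pvDict_scan, PySem.Dict.getD_empty]
  · rw [if_neg h1, if_neg h1]
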